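-- pv_equiv track=rewrite | github.com/cellwebb/kittylog | src/clog/changelog.py | limit_bullets_in_sections
-- ===== SOURCE A (Python) =====
-- from typing import List
--
-- def limit_bullets_in_sections(content_lines: List[str], max_bullets: int = 6) -> List[str]:
--     """Limit the number of bullet points in each section to a maximum count.
--
--     Args:
--         content_lines: List of content lines to process
--         max_bullets: Maximum number of bullets per section (default 6)
--
--     Returns:
--         List of lines with bullet points limited per section
--     """
--     limited_lines = []
--     current_section = None
--     section_bullet_count = {}
--
--     for line in content_lines:
--         stripped_line = line.strip()
--
--         # Handle section headers
--         if stripped_line.startswith('### '):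
--             current_section = stripped_line
--             section_bullet_count[current_section] = 0
--             limited_lines.append(line)
--         elif stripped_line.startswith('- ') and current_section:
--             # Handle bullet points - limit to max_bullets per section
--             if section_bullet_count.get(current_section, 0) < max_bullets:
--                 limited_lines.append(line)
--                 section_bullet_count[current_section] = section_bullet_count.get(current_section, 0) + 1
--         else:
--             limited_lines.append(line)
--
--     return limited_lines
-- ===== SOURCE B (Python) =====
-- from typing import List
--
-- def limit_bullets_in_sections(content_lines: List[str], max_bullets: int = 6) -> List[str]:
--     """Partition the lines into a preamble plus '### '-headed segments,
--     then emit the preamble verbatim and each segment with its bullets capped."""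
--     # pass 1: group into segments; segments[0] is the preamble (possibly empty)
--     segments = [[]]
--     for line in content_lines:
--         if line.strip().startswith('### '):
--             segments.append([line])
--         else:
--             segments[-1].append(line)
--
--     # pass 2: preamble verbatim, then each segment with at most max_bullets bullets
--     out = list(segments[0])
--     for seg in segments[1:]:
--         out.append(seg[0])
--         kept = 0
--         for line in seg[1:]:
--             if line.strip().startswith('- '):
--                 if kept < max_bullets:
--                     out.append(line)
--                     kept += 1
--             else:
--                 out.append(line)
--     return out
-- ===== Notes on version B (the rewrite author's own statement) =====
-- stated objective: alternative
-- what changed: Replaced A's single stateful pass (current-section variable plus a per-header-text count dictionary) by a two-pass partition-then-filter: group lines into a preamble and '### '-headed segments, then cap bullets independently inside each segment; the dictionary disappears entirely.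
import Mathlib
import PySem

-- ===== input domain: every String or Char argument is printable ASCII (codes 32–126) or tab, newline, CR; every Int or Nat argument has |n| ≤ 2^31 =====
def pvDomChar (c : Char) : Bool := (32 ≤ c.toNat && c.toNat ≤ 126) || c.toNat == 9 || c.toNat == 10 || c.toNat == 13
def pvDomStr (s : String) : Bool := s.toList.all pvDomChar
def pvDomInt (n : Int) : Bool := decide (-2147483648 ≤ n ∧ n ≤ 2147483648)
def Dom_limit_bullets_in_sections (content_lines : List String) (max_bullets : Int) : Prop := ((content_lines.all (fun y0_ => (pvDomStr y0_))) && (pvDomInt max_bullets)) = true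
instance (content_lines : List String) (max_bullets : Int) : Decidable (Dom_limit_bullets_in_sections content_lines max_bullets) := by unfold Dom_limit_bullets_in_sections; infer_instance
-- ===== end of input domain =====

-- B replaces A's single stateful pass (current-section variable + per-header count dict)
-- by a partition-into-segments pass followed by a per-segment bullet-capping pass (objective: alternative).


-- ===== PORT A =====
-- loop body of A; state = (limited_lines, current_section, section_bullet_count).
-- Python's truthiness test 'and current' is ported as 'isSome': whenever current_section
-- is set it is a stripped line starting with "### ", hence a nonempty (truthy) string.
def pvStepA (max_bullets : Int)
    (st : List String × Option String × PySem.Dict String Int) (line : String) :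
    List String × Option String × PySem.Dict String Int :=
  let stripped := PySem.Str.strip line
  if PySem.Str.startswith stripped "### " then
    (st.1 ++ [line], some stripped, st.2.2.insert stripped 0)
  else if PySem.Str.startswith stripped "- " && st.2.1.isSome then
    match st.2.1 with
    | some c =>
      if st.2.2.getD c 0 < max_bullets then
        (st.1 ++ [line], st.2.1, st.2.2.insert c (st.2.2.getD c 0 + 1))
      else st
    | none => st
  else (st.1 ++ [line], st.2.1, st.2.2)

def limit_bullets_in_sections (content_lines : List String) (max_bullets : Int) : List String :=
  (content_lines.foldl (pvStepA max_bullets) ([], none, PySem.Dict.empty)).1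

-- ===== PORT B =====
-- pass 1 loop body: state = (finished segments, current segment being built)
def pvStepGroup (st : List (List String) × List String) (line : String) :
    List (List String) × List String :=
  if PySem.Str.startswith (PySem.Str.strip line) "### " then (st.1 ++ [st.2], [line])
  else (st.1, st.2 ++ [line])

-- pass 2 inner loop body: (out so far, bullets kept in this segment)
def pvLimitStep (max_bullets : Int) (acc : List String × Int) (line : String) :
    List String × Int :=
  if PySem.Str.startswith (PySem.Str.strip line) "- " then
    if acc.2 < max_bullets then (acc.1 ++ [line], acc.2 + 1) else acc
  else (acc.1 ++ [line], acc.2)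

-- one '### '-headed segment: header, then its lines with bullets capped
def pvLimitSeg (max_bullets : Int) (seg : List String) : List String :=
  match seg with
  | [] => []
  | h :: body => h :: (body.foldl (pvLimitStep max_bullets) ([], 0)).1

def limit_bullets_in_sections_alt (content_lines : List String) (max_bullets : Int) : List String :=
  let st := content_lines.foldl pvStepGroup ([], [])
  let segments := st.1 ++ [st.2]
  match segments with
  | [] => []
  | g0 :: gs => gs.foldl (fun out seg => out ++ pvLimitSeg max_bullets seg) g0

-- ===== PRECONDITION & SPEC =====
def Spec_limit_bullets_in_sections (content_lines : List String) (max_bullets : Int) (out : List String) : Prop := out = limit_bullets_in_sections_alt content_lines max_bullets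
instance (content_lines : List String) (max_bullets : Int) (out : List String) : Decidable (Spec_limit_bullets_in_sections content_lines max_bullets out) := by unfold Spec_limit_bullets_in_sections; infer_instance

-- ===== CLAIM (what is proved, stated in full; the proofs are below) =====
def Claim_equal_limit_bullets_in_sections : Prop := ∀ (content_lines : List String) (max_bullets : Int), Dom_limit_bullets_in_sections content_lines max_bullets → Spec_limit_bullets_in_sections content_lines max_bullets (limit_bullets_in_sections content_lines max_bullets)

-- ===== LEMMAS AND PROOFS =====

-- abbreviations for the two line tests
def pvHdr (line : String) : Bool := PySem.Str.startswith (PySem.Str.strip line) "### "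
def pvBul (line : String) : Bool := PySem.Str.startswith (PySem.Str.strip line) "- "

-- common abstraction of both programs: cur = none before the first header,
-- some k with k bullets already kept in the current section
def pvGo (m : Int) : List String → Option Int → List String
  | [], _ => []
  | ln :: rest, cur =>
    if pvHdr ln then ln :: pvGo m rest (some 0)
    else
      match cur with
      | none => ln :: pvGo m rest none
      | some k =>
        if pvBul ln then
          if k < m then ln :: pvGo m rest (some (k + 1)) else pvGo m rest (some k)
        else ln :: pvGo m rest (some k)

-- recursive form of B's grouping pass
def pvGroupCont : List String → List String → List (List String)
  | cur, [] => [cur]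
  | cur, ln :: rest =>
    if pvHdr ln then cur :: pvGroupCont [ln] rest else pvGroupCont (cur ++ [ln]) rest

-- recursive forms of B's per-segment filter and its final counter
def pvFilt (m : Int) : List String → Int → List String
  | [], _ => []
  | ln :: rest, k =>
    if pvBul ln then (if k < m then ln :: pvFilt m rest (k + 1) else pvFilt m rest k)
    else ln :: pvFilt m rest k

def pvCnt (m : Int) : List String → Int → Int
  | [], k => k
  | ln :: rest, k =>
    if pvBul ln then (if k < m then pvCnt m rest (k + 1) else pvCnt m rest k)
    else pvCnt m rest k

-- ---- A-side: the fold equals pvGo ----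
lemma pvFoldA_eq (m : Int) (lines : List String) :
    ∀ (limited : List String) (cur : Option String) (d : PySem.Dict String Int),
      (lines.foldl (pvStepA m) (limited, cur, d)).1
        = limited ++ pvGo m lines (cur.map (fun c => d.getD c 0)) := by
  induction lines with
  | nil => intro limited cur d; simp [pvGo]
  | cons ln rest ih =>
    intro limited cur d
    by_cases hh : pvHdr ln
    · have : pvStepA m (limited, cur, d) ln
          = (limited ++ [ln], some (PySem.Str.strip ln), d.insert (PySem.Str.strip ln) 0) := by
        simp [pvStepA, pvHdr] at hh ⊢; simp [hh]
      rw [List.foldl_cons, this, ih]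
      simp [pvGo, hh, PySem.Dict.getD_insert_self]
    · cases cur with
      | none =>
        have : pvStepA m (limited, none, d) ln = (limited ++ [ln], none, d) := by
          simp [pvStepA, pvHdr] at hh ⊢; simp [hh]
        rw [List.foldl_cons, this, ih]
        simp [pvGo, hh]
      | some c =>
        by_cases hb : pvBul ln
        · by_cases hk : d.getD c 0 < m
          · have : pvStepA m (limited, some c, d) ln
                = (limited ++ [ln], some c, d.insert c (d.getD c 0 + 1)) := by
              simp [pvStepA, pvHdr, pvBul] at hh hb ⊢; simp [hh, hb, hk]
            rw [List.foldl_cons, this, ih]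
            simp [pvGo, hh, hb, hk, PySem.Dict.getD_insert_self]
          · have : pvStepA m (limited, some c, d) ln = (limited, some c, d) := by
              simp [pvStepA, pvHdr, pvBul] at hh hb ⊢; simp [hh, hb, hk]
            rw [List.foldl_cons, this, ih]
            simp [pvGo, hh, hb, hk]
        · have : pvStepA m (limited, some c, d) ln = (limited ++ [ln], some c, d) := by
            simp [pvStepA, pvHdr, pvBul] at hh hb ⊢; simp [hh, hb]
          rw [List.foldl_cons, this, ih]
          simp [pvGo, hh, hb]

-- ---- B-side: grouping fold equals pvGroupCont ----
lemma pvFoldGroup_eq (lines : List String) :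
    ∀ (done : List (List String)) (cur : List String),
      (lines.foldl pvStepGroup (done, cur)).1 ++ [(lines.foldl pvStepGroup (done, cur)).2]
        = done ++ pvGroupCont cur lines := by
  induction lines with
  | nil => intro done cur; simp [pvGroupCont]
  | cons ln rest ih =>
    intro done cur
    by_cases hh : pvHdr ln
    · have : pvStepGroup (done, cur) ln = (done ++ [cur], [ln]) := by
        simp [pvStepGroup, pvHdr] at hh ⊢; simp [hh]
      rw [List.foldl_cons, this, ih]
      simp [pvGroupCont, hh]
    · have : pvStepGroup (done, cur) ln = (done, cur ++ [ln]) := by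
        simp [pvStepGroup, pvHdr] at hh ⊢; simp [hh]
      rw [List.foldl_cons, this, ih]
      simp [pvGroupCont, hh]

-- ---- B-side: segment-body fold equals pvFilt / pvCnt ----
lemma pvFoldLimit_eq (m : Int) (body : List String) :
    ∀ (acc : List String) (k : Int),
      body.foldl (pvLimitStep m) (acc, k) = (acc ++ pvFilt m body k, pvCnt m body k) := by
  induction body with
  | nil => intro acc k; simp [pvFilt, pvCnt]
  | cons ln rest ih =>
    intro acc k
    by_cases hb : pvBul ln
    · by_cases hk : k < m
      · have : pvLimitStep m (acc, k) ln = (acc ++ [ln], k + 1) := by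
          simp [pvLimitStep, pvBul] at hb ⊢; simp [hb, hk]
        rw [List.foldl_cons, this, ih]
        simp [pvFilt, pvCnt, hb, hk]
      · have : pvLimitStep m (acc, k) ln = (acc, k) := by
          simp [pvLimitStep, pvBul] at hb ⊢; simp [hb, hk]
        rw [List.foldl_cons, this, ih]
        simp [pvFilt, pvCnt, hb, hk]
    · have : pvLimitStep m (acc, k) ln = (acc ++ [ln], k) := by
        simp [pvLimitStep, pvBul] at hb ⊢; simp [hb]
      rw [List.foldl_cons, this, ih]
      simp [pvFilt, pvCnt, hb]

lemma pvLimitSeg_cons (m : Int) (h : String) (body : List String) :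
    pvLimitSeg m (h :: body) = h :: pvFilt m body 0 := by
  simp [pvLimitSeg, pvFoldLimit_eq]

-- append laws for the filter and its counter
lemma pvFilt_append (m : Int) (xs ys : List String) :
    ∀ k, pvFilt m (xs ++ ys) k = pvFilt m xs k ++ pvFilt m ys (pvCnt m xs k) := by
  induction xs with
  | nil => intro k; simp [pvFilt, pvCnt]
  | cons ln rest ih =>
    intro k
    by_cases hb : pvBul ln
    · by_cases hk : k < m <;> simp [pvFilt, pvCnt, hb, hk, ih]
    · simp [pvFilt, pvCnt, hb, ih]

lemma pvCnt_append (m : Int) (xs ys : List String) :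
    ∀ k, pvCnt m (xs ++ ys) k = pvCnt m ys (pvCnt m xs k) := by
  induction xs with
  | nil => intro k; simp [pvCnt]
  | cons ln rest ih =>
    intro k
    by_cases hb : pvBul ln
    · by_cases hk : k < m <;> simp [pvCnt, hb, hk, ih]
    · simp [pvCnt, hb, ih]

-- the flatMap of the capped segments after a header equals pvGo in section mode
lemma pvFlat_groupCont (m : Int) (lines : List String) :
    ∀ (h : String) (body : List String),
      (pvGroupCont (h :: body) lines).flatMap (pvLimitSeg m)
        = h :: pvFilt m body 0 ++ pvGo m lines (some (pvCnt m body 0)) := by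
  induction lines with
  | nil => intro h body; simp [pvGroupCont, pvGo, pvLimitSeg_cons]
  | cons ln rest ih =>
    intro h body
    by_cases hh : pvHdr ln
    · simp only [pvGroupCont, hh, if_pos, List.flatMap_cons, pvLimitSeg_cons]
      rw [ih ln []]
      simp [pvGo, hh, pvFilt, pvCnt]
    · have hc : (h :: body) ++ [ln] = h :: (body ++ [ln]) := by simp
      simp only [pvGroupCont, hh, if_neg, Bool.false_eq_true, not_false_iff, hc]
      rw [ih h (body ++ [ln])]
      rw [pvFilt_append, pvCnt_append]
      by_cases hb : pvBul ln
      · by_cases hk : pvCnt m body 0 < m <;>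
          simp [pvGo, pvFilt, pvCnt, hh, hb, hk]
      · simp [pvGo, pvFilt, pvCnt, hh, hb]

-- processing the whole grouping equals pvGo from the initial state
def pvProcess (m : Int) : List (List String) → List String
  | [] => []
  | g0 :: gs => g0 ++ gs.flatMap (pvLimitSeg m)

lemma pvProcess_groupCont (m : Int) (lines : List String) :
    ∀ (pre : List String),
      pvProcess m (pvGroupCont pre lines) = pre ++ pvGo m lines none := by
  induction lines with
  | nil => intro pre; simp [pvGroupCont, pvProcess, pvGo]
  | cons ln rest ih =>
    intro pre
    by_cases hh : pvHdr ln
    · simp only [pvGroupCont, hh, if_pos, pvProcess]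
      rw [pvFlat_groupCont m rest ln []]
      simp [pvGo, hh, pvFilt, pvCnt]
    · simp only [pvGroupCont, hh, if_neg, Bool.false_eq_true, not_false_iff]
      rw [ih (pre ++ [ln])]
      simp [pvGo, hh]

-- the segment loop in alt is a flatMap
lemma pvFoldSeg_eq (m : Int) (gs : List (List String)) :
    ∀ (out : List String),
      gs.foldl (fun out seg => out ++ pvLimitSeg m seg) out = out ++ gs.flatMap (pvLimitSeg m) := by
  induction gs with
  | nil => intro out; simp
  | cons g rest ih => intro out; rw [List.foldl_cons, ih]; simp

lemma pvAlt_eq_go (cl : List String) (m : Int) :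
    limit_bullets_in_sections_alt cl m = pvGo m cl none := by
  have hg := pvFoldGroup_eq cl [] []
  simp only [List.nil_append] at hg
  have hp := pvProcess_groupCont m cl []
  simp only [List.nil_append] at hp
  rw [← hp, ← hg]
  simp only [limit_bullets_in_sections_alt]
  generalize List.foldl pvStepGroup ([], []) cl = st
  obtain ⟨a, b⟩ := st
  cases a with
  | nil => simp [pvProcess]
  | cons a0 as =>
    simp only [pvProcess, List.cons_append]
    rw [pvFoldSeg_eq]

-- ===== VERDICT (by name: the statement is the Claim_ definition above) =====
theorem limit_bullets_in_sections_spec : Claim_equal_limit_bullets_in_sections := by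
  intro cl m _
  unfold Spec_limit_bullets_in_sections
  rw [pvAlt_eq_go]
  unfold limit_bullets_in_sections
  rw [pvFoldA_eq m cl [] none PySem.Dict.empty]
  simp
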